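-- pv_equiv track=rewrite | github.com/tanmaypatil1311/tds-ppt | backend/services/pptx_analyzer.py | get_best_layout_for_slide_type
-- ===== SOURCE A (Python) =====
-- from typing import Dict, List, Any, Optional
--
-- def get_best_layout_for_slide_type(template_data: Dict, slide_type: str) -> Optional[Dict]:
--     """Get the best layout for a given slide type"""
--     layouts = template_data.get('layouts', [])
--
--     # Mapping of slide types to layout preferences
--     type_mapping = {
--         'title': ['title', 'basic'],
--         'content': ['content', 'basic'],
--         'section': ['title', 'content'],
--         'conclusion': ['content', 'basic'],
--         'image': ['image', 'content']
--     }
--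
--     preferred_types = type_mapping.get(slide_type, ['basic', 'content'])
--
--     # Find best matching layout
--     for pref_type in preferred_types:
--         for layout in layouts:
--             if layout.get('used_for') == pref_type:
--                 return layout
--
--     # Return first layout if no match found
--     return layouts[0] if layouts else None
-- ===== SOURCE B (Python) =====
-- def get_best_layout_for_slide_type(template_data, slide_type):
--     """Get the best layout for a given slide type"""
--     layouts = template_data.get('layouts', [])
--
--     type_mapping = {
--         'title': ['title', 'basic'],
--         'content': ['content', 'basic'],
--         'section': ['title', 'content'],
--         'conclusion': ['content', 'basic'],
--         'image': ['image', 'content']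
--     }
--
--     preferred_types = type_mapping.get(slide_type, ['basic', 'content'])
--
--     # Single pass over layouts: keep the first layout of the lowest preference rank.
--     best = None
--     best_rank = len(preferred_types)
--     for layout in layouts:
--         try:
--             rank = preferred_types.index(layout.get('used_for'))
--         except ValueError:
--             continue
--         if rank < best_rank:
--             best_rank = rank
--             best = layout
--
--     if best is not None:
--         return best
--
--     return layouts[0] if layouts else None
-- ===== Notes on version B (the rewrite author's own statement) =====
-- stated objective: alternative
-- what changed: Replaces A's preference-major nested scan with a single layouts-major pass that keeps the first layout of minimal preference rank (a min-by-rank scan), then falls back to the first layout.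
import Mathlib
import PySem

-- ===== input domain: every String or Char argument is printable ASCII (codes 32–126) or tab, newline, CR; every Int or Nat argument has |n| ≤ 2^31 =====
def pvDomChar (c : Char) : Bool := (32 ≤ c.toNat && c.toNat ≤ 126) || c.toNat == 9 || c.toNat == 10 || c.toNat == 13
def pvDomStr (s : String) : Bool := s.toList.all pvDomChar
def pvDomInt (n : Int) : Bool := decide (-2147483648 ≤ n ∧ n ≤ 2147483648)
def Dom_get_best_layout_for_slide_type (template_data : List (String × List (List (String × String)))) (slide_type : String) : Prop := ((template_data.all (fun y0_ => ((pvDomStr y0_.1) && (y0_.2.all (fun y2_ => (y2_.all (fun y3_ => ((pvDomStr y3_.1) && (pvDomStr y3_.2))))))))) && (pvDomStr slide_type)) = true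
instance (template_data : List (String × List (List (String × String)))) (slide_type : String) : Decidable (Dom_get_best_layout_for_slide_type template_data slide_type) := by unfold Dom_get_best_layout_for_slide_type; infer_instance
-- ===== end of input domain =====

-- B replaces A's preference-major nested scan with a single layouts-major pass keeping the first layout of minimal preference rank (alternative structure, same cost at this data size).


-- The fixed type_mapping dict of the Python source (shared literal; both Pythons spell it out identically)
def pvTypeMapping : PySem.Dict String (List String) :=
  PySem.Dict.mk [("title", ["title", "basic"]), ("content", ["content", "basic"]),
    ("section", ["title", "content"]), ("conclusion", ["content", "basic"]),
    ("image", ["image", "content"])]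

-- ===== PORT A =====
-- inner 'for layout in layouts: if layout.get('used_for') == pref_type: return layout'
def pvFindLayout (layouts : List (List (String × String))) (pref : String) :
    Option (List (String × String)) :=
  match layouts with
  | [] => none
  | l :: rest =>
    if (PySem.Dict.mk l).get? "used_for" == some pref then some l else pvFindLayout rest pref

-- outer 'for pref_type in preferred_types: …'
def pvPrefLoop (prefs : List String) (layouts : List (List (String × String))) :
    Option (List (String × String)) :=
  match prefs with
  | [] => none
  | p :: ps =>
    match pvFindLayout layouts p with
    | some l => some l
    | none => pvPrefLoop ps layouts

def get_best_layout_for_slide_type (template_data : List (String × List (List (String × String)))) (slide_type : String) : Option (List (String × String)) :=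
  let layouts := (PySem.Dict.mk template_data).getD "layouts" []
  let preferred := pvTypeMapping.getD slide_type ["basic", "content"]
  match pvPrefLoop preferred layouts with
  | some l => some l
  | none => match layouts with
    | [] => none
    | l :: _ => some l

-- ===== PORT B =====
-- 'preferred_types.index(layout.get('used_for'))' with ValueError -> none; a None key never matches
def pvIndexOpt (prefs : List String) (uf : Option String) : Option Nat :=
  match uf with
  | none => none
  | some s => PySem.List.index? prefs s

-- the 'for layout in layouts:' loop carrying (best, best_rank)
def pvBestLoop (prefs : List String) (layouts : List (List (String × String)))
    (best : Option (List (String × String))) (bestRank : Nat) :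
    Option (List (String × String)) × Nat :=
  match layouts with
  | [] => (best, bestRank)
  | l :: rest =>
    match pvIndexOpt prefs ((PySem.Dict.mk l).get? "used_for") with
    | none => pvBestLoop prefs rest best bestRank
    | some r => if r < bestRank then pvBestLoop prefs rest (some l) r
                else pvBestLoop prefs rest best bestRank

def get_best_layout_for_slide_type_alt (template_data : List (String × List (List (String × String)))) (slide_type : String) : Option (List (String × String)) :=
  let layouts := (PySem.Dict.mk template_data).getD "layouts" []
  let preferred := pvTypeMapping.getD slide_type ["basic", "content"]
  match (pvBestLoop preferred layouts none preferred.length).1 with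
  | some b => some b
  | none => match layouts with
    | [] => none
    | l :: _ => some l

-- ===== PRECONDITION & SPEC =====
def Spec_get_best_layout_for_slide_type (template_data : List (String × List (List (String × String)))) (slide_type : String) (out : Option (List (String × String))) : Prop := out = get_best_layout_for_slide_type_alt template_data slide_type
instance (template_data : List (String × List (List (String × String)))) (slide_type : String) (out : Option (List (String × String))) : Decidable (Spec_get_best_layout_for_slide_type template_data slide_type out) := by unfold Spec_get_best_layout_for_slide_type; infer_instance

-- ===== CLAIM (what is proved, stated in full; the proofs are below) =====
def Claim_equal_get_best_layout_for_slide_type : Prop := ∀ (template_data : List (String × List (List (String × String)))) (slide_type : String), Dom_get_best_layout_for_slide_type template_data slide_type → Spec_get_best_layout_for_slide_type template_data slide_type (get_best_layout_for_slide_type template_data slide_type)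

-- ===== LEMMAS AND PROOFS =====

-- index? on a two-element preference list, by cases
theorem pvIndex_two (p0 p1 s : String) :
    PySem.List.index? [p0, p1] s =
      if p0 = s then some 0 else if p1 = s then some 1 else none := by
  by_cases h0 : p0 = s
  · subst h0; rw [PySem.List.index?_cons_self]; simp
  · rw [PySem.List.index?_cons_of_ne _ h0]
    by_cases h1 : p1 = s
    · subst h1; rw [PySem.List.index?_cons_self]; simp [h0]
    · rw [PySem.List.index?_cons_of_ne _ h1]
      have hnil : PySem.List.index? ([] : List String) s = none := by
        rw [PySem.List.index?_eq_none_iff]; simp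
      rw [hnil]; simp [h0, h1]

-- once bestRank = 0 nothing can improve
theorem pvBestLoop_rank0 (prefs : List String) (layouts : List (List (String × String)))
    (b : List (String × String)) :
    pvBestLoop prefs layouts (some b) 0 = (some b, 0) := by
  induction layouts with
  | nil => rfl
  | cons l rest ih =>
    simp only [pvBestLoop]
    cases pvIndexOpt prefs ((PySem.Dict.mk l).get? "used_for") with
    | none => exact ih
    | some r => simp [ih]

-- at bestRank = 1 only a p0-match can improve
theorem pvBestLoop_rank1 (p0 p1 : String) (layouts : List (List (String × String)))
    (b : List (String × String)) :
    pvBestLoop [p0, p1] layouts (some b) 1 =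
      match pvFindLayout layouts p0 with
      | some l => (some l, 0)
      | none => (some b, 1) := by
  induction layouts with
  | nil => rfl
  | cons l rest ih =>
    simp only [pvBestLoop, pvFindLayout]
    cases huf : (PySem.Dict.mk l).get? "used_for" with
    | none => simp only [pvIndexOpt]; simpa using ih
    | some s =>
      simp only [pvIndexOpt, pvIndex_two]
      by_cases h0 : p0 = s
      · subst h0
        simp [pvBestLoop_rank0]
      · by_cases h1 : p1 = s
        · subst h1; simp [h0, Ne.symm h0, ih]
        · simp [h0, h1, ih, Ne.symm h0]

-- the whole loop from the initial state, characterised by the two scans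
theorem pvBestLoop_rank2 (p0 p1 : String) (layouts : List (List (String × String))) :
    pvBestLoop [p0, p1] layouts none 2 =
      match pvFindLayout layouts p0 with
      | some l => (some l, 0)
      | none =>
        match pvFindLayout layouts p1 with
        | some l => (some l, 1)
        | none => (none, 2) := by
  induction layouts with
  | nil => rfl
  | cons l rest ih =>
    simp only [pvBestLoop, pvFindLayout]
    cases huf : (PySem.Dict.mk l).get? "used_for" with
    | none => simp only [pvIndexOpt]; simpa using ih
    | some s =>
      simp only [pvIndexOpt, pvIndex_two]
      by_cases h0 : p0 = s
      · subst h0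
        simp [pvBestLoop_rank0]
      · by_cases h1 : p1 = s
        · subst h1
          simp [h0, Ne.symm h0, pvBestLoop_rank1]
        · simp [h0, h1, Ne.symm h0, Ne.symm h1, ih]

theorem pvBestLoop_eq_prefLoop (p0 p1 : String) (layouts : List (List (String × String))) :
    (pvBestLoop [p0, p1] layouts none 2).1 = pvPrefLoop [p0, p1] layouts := by
  rw [pvBestLoop_rank2]
  cases h0 : pvFindLayout layouts p0 with
  | some l => simp [pvPrefLoop, h0]
  | none =>
    cases h1 : pvFindLayout layouts p1 with
    | some l => simp [pvPrefLoop, h0, h1]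
    | none => simp [pvPrefLoop, h0, h1]

-- the preference list is always a pair
theorem pvPref_pair (st : String) :
    ∃ p0 p1 : String, pvTypeMapping.getD st ["basic", "content"] = [p0, p1] := by
  by_cases h1 : st = "title"; · exact ⟨"title", "basic", by subst h1; rfl⟩
  by_cases h2 : st = "content"; · exact ⟨"content", "basic", by subst h2; rfl⟩
  by_cases h3 : st = "section"; · exact ⟨"title", "content", by subst h3; rfl⟩
  by_cases h4 : st = "conclusion"; · exact ⟨"content", "basic", by subst h4; rfl⟩
  by_cases h5 : st = "image"; · exact ⟨"image", "content", by subst h5; rfl⟩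
  refine ⟨"basic", "content", ?_⟩
  simp [pvTypeMapping, PySem.Dict.getD, PySem.Dict.get?,
    Ne.symm h1, Ne.symm h2, Ne.symm h3, Ne.symm h4, Ne.symm h5]

-- ===== VERDICT (by name: the statement is the Claim_ definition above) =====
theorem get_best_layout_for_slide_type_spec : Claim_equal_get_best_layout_for_slide_type := by
  intro td st _
  unfold Spec_get_best_layout_for_slide_type
  obtain ⟨p0, p1, hp⟩ := pvPref_pair st
  have h2 : ([p0, p1] : List String).length = 2 := rfl
  simp only [get_best_layout_for_slide_type, get_best_layout_for_slide_type_alt, hp, h2,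
    pvBestLoop_eq_prefLoop]
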